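-- pv_equiv track=rewrite | github.com/rpuffin/advent-of-code-2024 | Day8.py | get_ordered_data
-- ===== SOURCE A (Python) =====
-- def get_ordered_data(data):
-- 	ordered_data = {}
-- 	for x, row in enumerate(data):
-- 		for y, cell in enumerate(row):
-- 			if cell != '.':
-- 				if cell in ordered_data:
-- 					ordered_data[cell].append([x, y])
-- 				else:
-- 					coords = [[x, y]]
-- 					ordered_data[cell] = coords
--
-- 	return ordered_data
-- ===== SOURCE B (Python) =====
-- def get_ordered_data(data):
-- 	entries = [(cell, [x, y])
-- 	           for x, row in enumerate(data)
-- 	           for y, cell in enumerate(row)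
-- 	           if cell != '.']
-- 	return {c: [p for ch, p in entries if ch == c]
-- 	        for c in dict.fromkeys(ch for ch, _ in entries)}
-- ===== Notes on version B (the rewrite author's own statement) =====
-- stated objective: alternative
-- what changed: Replaces the incremental dict-dispatch (contains-check, append-or-insert per cell) with a materialize-then-group pipeline: flatten the grid into a list of (char, [x, y]) entries, dedup the characters in first-appearance order, and build each frequency's list by filtering the flat entry list.
import Mathlib
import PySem

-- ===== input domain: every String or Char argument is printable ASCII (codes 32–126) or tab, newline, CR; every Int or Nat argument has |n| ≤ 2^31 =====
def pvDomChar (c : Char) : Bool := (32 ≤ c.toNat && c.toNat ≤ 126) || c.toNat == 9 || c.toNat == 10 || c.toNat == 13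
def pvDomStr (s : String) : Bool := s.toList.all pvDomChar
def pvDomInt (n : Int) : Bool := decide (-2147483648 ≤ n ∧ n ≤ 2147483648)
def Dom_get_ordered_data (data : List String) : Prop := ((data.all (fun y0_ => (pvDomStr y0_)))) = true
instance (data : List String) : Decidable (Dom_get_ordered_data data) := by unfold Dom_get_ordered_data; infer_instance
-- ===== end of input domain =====

-- B replaces A's incremental dict-dispatch with a flatten/dedup/filter grouping pipeline (alternative structure, same results).


-- ===== PORT A =====
def get_ordered_data (data : List String) : List (String × List (List Int)) :=
  ((PySem.List.enumerate data).foldl (fun od xrow =>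
    (PySem.List.enumerate xrow.2.toList).foldl (fun od ycell =>
      if ycell.2 ≠ '.' then
        if od.contains (String.ofList [ycell.2]) then
          od.modify (String.ofList [ycell.2]) [] (· ++ [[xrow.1, ycell.1]])
        else
          od.insert (String.ofList [ycell.2]) [[xrow.1, ycell.1]]
      else od) od) PySem.Dict.empty).items

-- ===== PORT B =====
def get_ordered_data_alt (data : List String) : List (String × List (List Int)) :=
  let entries : List (String × List Int) :=
    (PySem.List.enumerate data).flatMap (fun xrow =>
      ((PySem.List.enumerate xrow.2.toList).filter (fun ycell => ycell.2 ≠ '.')).map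
        (fun ycell => (String.ofList [ycell.2], [xrow.1, ycell.1])))
  (PySem.List.dedup (entries.map Prod.fst)).map
    (fun c => (c, (entries.filter (fun e => e.1 == c)).map Prod.snd))

-- ===== PRECONDITION & SPEC =====
def Spec_get_ordered_data (data : List String) (out : List (String × List (List Int))) : Prop := out = get_ordered_data_alt data
instance (data : List String) (out : List (String × List (List Int))) : Decidable (Spec_get_ordered_data data out) := by unfold Spec_get_ordered_data; infer_instance

-- ===== CLAIM =====
def Claim_equal_get_ordered_data : Prop := ∀ (data : List String), Dom_get_ordered_data data → Spec_get_ordered_data data (get_ordered_data data)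

-- ===== LEMMAS AND PROOFS =====
theorem pv_getD_of_not_contains (d : PySem.Dict String (List (List Int))) (k : String)
    (h : d.contains k = false) : d.getD k [] = [] := by
  unfold PySem.Dict.getD PySem.Dict.get? PySem.Dict.contains at *
  cases hf : List.find? (fun p => p.1 == k) d.items with
  | none => simp
  | some p =>
    exfalso
    rw [List.any_eq_false] at h
    have h1 : (p.1 == k) = true :=
      List.find?_some (p := fun q : String × List (List Int) => q.1 == k) hf
    exact h p (List.mem_of_find?_eq_some hf) h1

theorem pv_step_eq (od : PySem.Dict String (List (List Int))) (p : String × List Int) :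
    (if od.contains p.1 then od.modify p.1 [] (· ++ [p.2]) else od.insert p.1 [p.2])
      = od.modify p.1 [] (· ++ [p.2]) := by
  by_cases h : od.contains p.1 = true
  · simp [h]
  · simp only [Bool.not_eq_true] at h
    simp [h, PySem.Dict.modify, pv_getD_of_not_contains od p.1 h]

theorem pv_flat (data : List String) :
    ((PySem.List.enumerate data).foldl (fun od xrow =>
      (PySem.List.enumerate xrow.2.toList).foldl (fun od ycell =>
        if ycell.2 ≠ '.' then
          if od.contains (String.ofList [ycell.2]) then
            od.modify (String.ofList [ycell.2]) [] (· ++ [[xrow.1, ycell.1]])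
          else
            od.insert (String.ofList [ycell.2]) [[xrow.1, ycell.1]]
        else od) od) PySem.Dict.empty)
    = ((PySem.List.enumerate data).flatMap (fun xrow =>
        ((PySem.List.enumerate xrow.2.toList).filter (fun ycell => ycell.2 ≠ '.')).map
          (fun ycell => (String.ofList [ycell.2], ([xrow.1, ycell.1] : List Int))))).foldl
        (fun d p => d.modify p.1 [] (· ++ [p.2])) PySem.Dict.empty := by
  rw [List.foldl_flatMap]
  refine PySem.List.foldl_congr_mem _ _ _ _ (fun d xrow _ => ?_)
  rw [List.foldl_map, List.foldl_filter]
  refine PySem.List.foldl_congr_mem _ _ _ _ (fun d ycell _ => ?_)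
  by_cases h : ycell.2 = '.'
  · simp [h]
  · simp only [h, ne_eq, not_false_eq_true, decide_true, if_true]
    exact pv_step_eq d (String.ofList [ycell.2], [xrow.1, ycell.1])

theorem pv_main (data : List String) : get_ordered_data data = get_ordered_data_alt data := by
  unfold get_ordered_data get_ordered_data_alt
  rw [pv_flat]
  set entries := (PySem.List.enumerate data).flatMap (fun xrow =>
    ((PySem.List.enumerate xrow.2.toList).filter (fun ycell => ycell.2 ≠ '.')).map
      (fun ycell => (String.ofList [ycell.2], ([xrow.1, ycell.1] : List Int)))) with hE
  set d := entries.foldl (fun d p => d.modify p.1 [] (· ++ [p.2])) PySem.Dict.empty with hd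
  have hkeys : d.keys = PySem.List.dedup (entries.map Prod.fst) := by
    rw [hd]
    have := PySem.Dict.keys_foldl_modify_key entries Prod.fst []
      (fun _ p => (· ++ [p.2])) PySem.Dict.empty
    simpa [PySem.List.dedup, PySem.Set.ofList, PySem.Set.update, PySem.Dict.empty,
      PySem.Dict.keys] using this
  have hnd : d.keys.Nodup := by
    rw [hd]
    exact PySem.Dict.nodup_keys_foldl_modify_key entries Prod.fst []
      (fun _ p => (· ++ [p.2])) PySem.Dict.empty (by simp [PySem.Dict.empty, PySem.Dict.keys])
  rw [PySem.Dict.items_eq_map_keys d hnd [], hkeys]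
  refine List.map_congr_left (fun c _ => ?_)
  have := PySem.Dict.getD_foldl_modify_append entries PySem.Dict.empty c
  rw [← hd] at this
  simp only [this]
  simp [PySem.Dict.empty, PySem.Dict.getD, PySem.Dict.get?]

-- ===== VERDICT =====
theorem get_ordered_data_spec : Claim_equal_get_ordered_data := by
  intro data _
  unfold Spec_get_ordered_data
  exact pv_main data
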